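-- pv_equiv track=rewrite | github.com/matinabbasi788/contest | codeforces/1971-C.py | solve
-- ===== SOURCE A (Python) =====
-- def solve(a, b, c, d):
--     l1 = []
--     l2 = []
--     for i in range(min(a, b) + 1, max(a, b)):
--         l1.append(i)
--     for i in range(1, 13):
--         if (i not in l1) and (i not in (a, b)):
--             l2.append(i)
--     if (c in l1 and d in l2) or (c in l2 and d in l1):
--         return "YES"
--     else:
--         return "NO"
-- ===== SOURCE B (Python) =====
-- def solve(a, b, c, d):
--     # Classify each query point into one of three zones relative to the
--     # closed interval [lo, hi] = [min(a,b), max(a,b)]: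
--     #   zone 1: strictly inside the open interval (lo, hi)
--     #   zone 2: on the clock (1..12) but outside the closed interval [lo, hi]
--     #   zone 0: anywhere else (an endpoint, or off the clock and not inside)
--     # The answer is YES exactly when one point is in zone 1 and the other in
--     # zone 2, i.e. when the product of the two zone codes equals 2.
--     lo, hi = min(a, b), max(a, b)
--
--     def zone(x):
--         if lo < x < hi:
--             return 1
--         if 1 <= x <= 12 and not (lo <= x <= hi):
--             return 2
--         return 0
--
--     return "YES" if zone(c) * zone(d) == 2 else "NO"
-- ===== Notes on version B (the rewrite author's own statement) =====
-- stated objective: simpler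
-- what changed: Instead of building the inside/outside membership lists and testing four list memberships, B classifies each query point into one of three zones relative to the closed interval [min(a,b),max(a,b)] (1 = strictly inside, 2 = on the clock 1..12 but outside the closed interval, 0 = otherwise) and answers YES exactly when the product of the two zone codes is 2; the endpoint-exclusion tests disappear because endpoints fall in neither zone by the closed-interval test.
import Mathlib
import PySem

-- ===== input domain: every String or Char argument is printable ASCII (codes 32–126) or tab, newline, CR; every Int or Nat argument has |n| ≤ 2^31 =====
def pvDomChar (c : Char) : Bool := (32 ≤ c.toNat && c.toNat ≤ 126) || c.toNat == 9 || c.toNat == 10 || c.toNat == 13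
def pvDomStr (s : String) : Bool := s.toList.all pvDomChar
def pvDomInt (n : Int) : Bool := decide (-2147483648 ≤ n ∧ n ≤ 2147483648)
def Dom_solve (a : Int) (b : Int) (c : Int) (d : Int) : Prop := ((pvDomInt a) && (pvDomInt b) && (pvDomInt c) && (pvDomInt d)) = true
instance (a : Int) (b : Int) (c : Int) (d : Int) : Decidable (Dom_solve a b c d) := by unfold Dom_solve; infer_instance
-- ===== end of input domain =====

-- B replaces A's two list-building loops and four membership tests by a three-way
-- zone classification of each query point and an arithmetic decision (simpler).

-- ===== PORT A =====
def solve (a : Int) (b : Int) (c : Int) (d : Int) : String :=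
  -- l1 = []; for i in range(min(a,b)+1, max(a,b)): l1.append(i)
  -- append loop ported with the cons-accumulator + reverse idiom (list.append is O(1) in Python)
  let l1 : List Int :=
    ((PySem.List.pyRange (min a b + 1) (max a b) 1).foldl (fun acc i => i :: acc) []).reverse
  -- l2 = []; for i in range(1,13): if (i not in l1) and (i not in (a,b)): l2.append(i)
  let l2 : List Int :=
    (PySem.List.pyRange 1 13 1).foldl
      (fun acc i => if !l1.contains i && !(i == a || i == b) then acc ++ [i] else acc) []
  if (l1.contains c && l2.contains d) || (l2.contains c && l1.contains d) then "YES" else "NO"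

-- ===== PORT B =====
-- zone 1 = strictly inside (lo,hi); zone 2 = on the clock 1..12 but outside [lo,hi]; zone 0 = anything else
def pvZone (lo : Int) (hi : Int) (x : Int) : Int :=
  if lo < x ∧ x < hi then 1
  else if (1 ≤ x ∧ x ≤ 12) ∧ ¬(lo ≤ x ∧ x ≤ hi) then 2
  else 0

def solve_alt (a : Int) (b : Int) (c : Int) (d : Int) : String :=
  let lo := min a b
  let hi := max a b
  if pvZone lo hi c * pvZone lo hi d = 2 then "YES" else "NO"

-- ===== PRECONDITION & SPEC =====
def Spec_solve (a : Int) (b : Int) (c : Int) (d : Int) (out : String) : Prop := out = solve_alt a b c d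
instance (a : Int) (b : Int) (c : Int) (d : Int) (out : String) : Decidable (Spec_solve a b c d out) := by unfold Spec_solve; infer_instance

-- ===== CLAIM (what is proved, stated in full; the proofs are below) =====
def Claim_equal_solve : Prop := ∀ (a : Int) (b : Int) (c : Int) (d : Int), Dom_solve a b c d → Spec_solve a b c d (solve a b c d)

-- ===== LEMMAS AND PROOFS =====

-- membership in A's first list
theorem mem_l1 (a b x : Int) :
    (((PySem.List.pyRange (min a b + 1) (max a b) 1).foldl (fun acc i => i :: acc) []).reverse).contains x
      = decide (min a b < x ∧ x < max a b) := by
  have h : (((PySem.List.pyRange (min a b + 1) (max a b) 1).foldl (fun acc i => i :: acc) []).reverse)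
      = PySem.List.pyRange (min a b + 1) (max a b) 1 := by
    have gen : ∀ (l : List Int) (acc : List Int), l.foldl (fun a i => i :: a) acc = l.reverse ++ acc := by
      intro l
      induction l with
      | nil => simp
      | cons y ys ih => intro acc; simp [List.foldl_cons, ih]
    simp [gen]
  rw [h]
  simp [PySem.List.mem_pyRange_one]

theorem contains_foldl_filter (p : Int → Bool) (l : List Int) (x : Int) :
    (l.foldl (fun acc i => if p i then acc ++ [i] else acc) []).contains x
      = (x ∈ l && p x) := by
  rw [PySem.List.foldl_append_if_eq_filter]
  simp [List.mem_filter]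

-- ===== VERDICT (by name: the statement is the Claim_ definition above) =====
theorem solve_spec : Claim_equal_solve := by
  intro a b c d _
  show solve a b c d = solve_alt a b c d
  have hmem : ∀ x : Int, (x ∈ PySem.List.pyRange 1 13 1) = decide (1 ≤ x ∧ x ≤ 12) := by
    intro x
    simp [PySem.List.mem_pyRange_one]
    omega
  rcases le_total a b with hab | hab
  · simp only [solve, solve_alt, mem_l1, contains_foldl_filter]
    simp only [min_eq_left hab, max_eq_right hab, hmem, pvZone, Bool.or_eq_true,
      Bool.and_eq_true, Bool.not_eq_eq_eq_not, Bool.not_true, decide_eq_true_eq,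
      decide_eq_false_iff_not, Bool.or_eq_false_iff, beq_eq_false_iff_ne, ne_eq]
    split_ifs <;> first | rfl | (exfalso; omega)
  · simp only [solve, solve_alt, mem_l1, contains_foldl_filter]
    simp only [min_eq_right hab, max_eq_left hab, hmem, pvZone, Bool.or_eq_true,
      Bool.and_eq_true, Bool.not_eq_eq_eq_not, Bool.not_true, decide_eq_true_eq,
      decide_eq_false_iff_not, Bool.or_eq_false_iff, beq_eq_false_iff_ne, ne_eq]
    split_ifs <;> first | rfl | (exfalso; omega)
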